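-- pv_equiv track=rewrite | github.com/GraceThree/Homework | FPRMSpectrum.py | getSpec
-- ===== SOURCE A (Python) =====
-- def getSpec(code, table, nums):
--     newVec = [0] * len(table)
--     newCosts = [0] * len(table)
--     half = len(table)//2
--     if code[0] == "0":
--         for i in range(0, half):
--             newVec[i] = table[i] ^ table[i+half]
--             newVec[i+half] = table[i+half]
--             newCosts[i] = nums[i+half]# ^ costs[i+half] #How to combine these lol
--             newCosts[i+half] = nums[i]
--     else:
--         for i in range(0, half):
--             newVec[i] = table[i]
--             newVec[i+half] = table[i+half] ^ table[i]
--             newCosts[i] = nums[i]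
--             newCosts[i+half] = nums[i+half] #costs[i++half] ^ costs[i]
--     if len(code) == 1:
--         return (newVec, newCosts)
--     top = getSpec(code[1:], newVec[:half], newCosts[:half])
--     bottom = getSpec(code[1:], newVec[half:], newCosts[half:])
--     return (top[0]+bottom[0], top[1] + bottom[1])
-- ===== SOURCE B (Python) =====
-- def getSpec(code, table, nums):
--     # iterative double-buffer butterfly over one flat array, with explicit block boundaries
--     n = len(table)
--     vec, costs = list(table), list(nums)
--     blocks = [(0, n)]
--     for bit in code:
--         newv, newc = [0] * n, [0] * n
--         nxt = []
--         for s, m in blocks: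
--             h = m // 2
--             if bit == "0":
--                 for i in range(h):
--                     newv[s + i] = vec[s + i] ^ vec[s + i + h]
--                     newv[s + i + h] = vec[s + i + h]
--                     newc[s + i] = costs[s + i + h]
--                     newc[s + i + h] = costs[s + i]
--             else:
--                 for i in range(h):
--                     newv[s + i] = vec[s + i]
--                     newv[s + i + h] = vec[s + i + h] ^ vec[s + i]
--                     newc[s + i] = costs[s + i]
--                     newc[s + i + h] = costs[s + i + h]
--             nxt.append((s, h))
--             nxt.append((s + h, m - h))
--         vec, costs, blocks = newv, newc, nxt
--     return (vec, costs)
-- ===== Notes on version B (the rewrite author's own statement) =====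
-- stated objective: alternative
-- what changed: Replaces A's top-down divide-and-conquer recursion on slices (concatenating results up the call tree) with an iterative double-buffer butterfly over one flat array, walking an explicit list of block boundaries level by level; Pre_ excludes only inputs where A raises IndexError (empty code, or nums shorter than 2*(len(table)//2)).
import Mathlib
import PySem

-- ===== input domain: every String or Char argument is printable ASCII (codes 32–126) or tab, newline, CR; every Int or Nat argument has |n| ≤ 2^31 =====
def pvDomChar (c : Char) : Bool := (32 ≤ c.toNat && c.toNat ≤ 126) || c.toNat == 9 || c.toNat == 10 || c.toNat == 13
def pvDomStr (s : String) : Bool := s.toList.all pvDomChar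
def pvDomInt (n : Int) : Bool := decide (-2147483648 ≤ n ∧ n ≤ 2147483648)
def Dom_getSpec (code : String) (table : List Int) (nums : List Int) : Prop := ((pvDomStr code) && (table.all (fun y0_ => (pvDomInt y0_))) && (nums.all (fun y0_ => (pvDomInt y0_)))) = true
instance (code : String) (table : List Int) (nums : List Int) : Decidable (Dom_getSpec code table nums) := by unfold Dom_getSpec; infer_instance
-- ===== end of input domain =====

-- B replaces A's divide-and-conquer recursion on slices with an iterative double-buffer
-- butterfly over one flat array, walking an explicit list of block boundaries; equal on Pre_.

-- ===== PORT A =====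
-- A's two for-loops: newVec/newCosts start as [0]*len(table), positions i and i+half written in place
def stepA (c0 : Char) (table : List Int) (nums : List Int) : List Int × List Int :=
  let half : Int := PySem.Int.floordiv (PySem.List.len table) 2
  let init : List Int × List Int :=
    (List.replicate table.length (0 : Int), List.replicate table.length (0 : Int))
  if c0 == '0' then
    (PySem.List.pyRange 0 half 1).foldl (fun p i =>
      (PySem.List.pySetD
        (PySem.List.pySetD p.1 i
          (PySem.Int.bxor (PySem.List.pyGetD table i 0) (PySem.List.pyGetD table (i + half) 0)))
        (i + half) (PySem.List.pyGetD table (i + half) 0),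
       PySem.List.pySetD
        (PySem.List.pySetD p.2 i (PySem.List.pyGetD nums (i + half) 0))
        (i + half) (PySem.List.pyGetD nums i 0))) init
  else
    (PySem.List.pyRange 0 half 1).foldl (fun p i =>
      (PySem.List.pySetD
        (PySem.List.pySetD p.1 i (PySem.List.pyGetD table i 0))
        (i + half) (PySem.Int.bxor (PySem.List.pyGetD table (i + half) 0) (PySem.List.pyGetD table i 0)),
       PySem.List.pySetD
        (PySem.List.pySetD p.2 i (PySem.List.pyGetD nums i 0))
        (i + half) (PySem.List.pyGetD nums (i + half) 0))) init

-- A's recursion on code (code[1:] is the tail); the [] case is unreachable under Pre_ (code[0] raises)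
def getSpecAux : List Char → List Int → List Int → List Int × List Int
  | [], _, _ => ([], [])
  | c :: rest, table, nums =>
    let half : Int := PySem.Int.floordiv (PySem.List.len table) 2
    let p := stepA c table nums
    match rest with
    | [] => p
    | _ :: _ =>
      let top := getSpecAux rest (PySem.List.slice p.1 none (some half)) (PySem.List.slice p.2 none (some half))
      let bottom := getSpecAux rest (PySem.List.slice p.1 (some half) none) (PySem.List.slice p.2 (some half) none)
      (top.1 ++ bottom.1, top.2 ++ bottom.2)

def getSpec (code : String) (table : List Int) (nums : List Int) : List Int × List Int :=
  getSpecAux code.toList table nums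

-- ===== PORT B =====
-- Source B's inner loop body for one block (s, m): writes block [s, s+m) of the new arrays from vec/costs
def blockB (bit : Char) (vec costs : List Int)
    (st : List Int × List Int × List (Int × Int)) (b : Int × Int) :
    List Int × List Int × List (Int × Int) :=
  let s := b.1
  let m := b.2
  let h : Int := PySem.Int.floordiv m 2
  let p : List Int × List Int :=
    if bit == '0' then
      (PySem.List.pyRange 0 h 1).foldl (fun q i =>
        (PySem.List.pySetD (PySem.List.pySetD q.1 (s + i)
            (PySem.Int.bxor (PySem.List.pyGetD vec (s + i) 0) (PySem.List.pyGetD vec (s + i + h) 0)))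
          (s + i + h) (PySem.List.pyGetD vec (s + i + h) 0),
         PySem.List.pySetD (PySem.List.pySetD q.2 (s + i) (PySem.List.pyGetD costs (s + i + h) 0))
          (s + i + h) (PySem.List.pyGetD costs (s + i) 0))) (st.1, st.2.1)
    else
      (PySem.List.pyRange 0 h 1).foldl (fun q i =>
        (PySem.List.pySetD (PySem.List.pySetD q.1 (s + i) (PySem.List.pyGetD vec (s + i) 0))
          (s + i + h) (PySem.Int.bxor (PySem.List.pyGetD vec (s + i + h) 0) (PySem.List.pyGetD vec (s + i) 0)),
         PySem.List.pySetD (PySem.List.pySetD q.2 (s + i) (PySem.List.pyGetD costs (s + i) 0))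
          (s + i + h) (PySem.List.pyGetD costs (s + i + h) 0))) (st.1, st.2.1)
  (p.1, p.2, st.2.2 ++ [(s, h), (s + h, m - h)])

-- Source B's getSpec: fold over code; per level a fresh zeroed pair of arrays is filled block by block
def getSpec_alt (code : String) (table : List Int) (nums : List Int) : List Int × List Int :=
  let n := table.length
  let fin := code.toList.foldl (fun st bit =>
      st.2.2.foldl (blockB bit st.1 st.2.1)
        (List.replicate n (0 : Int), List.replicate n (0 : Int), ([] : List (Int × Int))))
    (table, nums, [((0 : Int), (n : Int))])
  (fin.1, fin.2.1)

-- ===== PRECONDITION & SPEC =====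
-- Pre_ is exactly A's non-raising inputs: code "" raises IndexError at code[0], and a nums shorter
-- than 2*(len(table)//2) raises IndexError at nums[i+half] in the first-level loop.
def Pre_getSpec (code : String) (table : List Int) (nums : List Int) : Prop :=
  code ≠ "" ∧ 2 * (table.length / 2) ≤ nums.length
instance (code : String) (table : List Int) (nums : List Int) : Decidable (Pre_getSpec code table nums) := by unfold Pre_getSpec; infer_instance

def pvWitness_getSpec : String × List Int × List Int := ("01", [1, 2, 3, 4], [5, 6, 7, 8])

def Spec_getSpec (code : String) (table : List Int) (nums : List Int) (out : List Int × List Int) : Prop := out = getSpec_alt code table nums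
instance (code : String) (table : List Int) (nums : List Int) (out : List Int × List Int) : Decidable (Spec_getSpec code table nums out) := by unfold Spec_getSpec; infer_instance

-- ===== CLAIM (what is proved, stated in full; the proofs are below) =====
def Claim_equal_getSpec : Prop := ∀ (code : String) (table : List Int) (nums : List Int), Dom_getSpec code table nums → Pre_getSpec code table nums → Spec_getSpec code table nums (getSpec code table nums)

-- ===== LEMMAS AND PROOFS =====

lemma halfI (n : Nat) : PySem.Int.floordiv (n : Int) 2 = ((n / 2 : Nat) : Int) := by
  exact_mod_cast PySem.Int.floordiv_natCast n 2

-- clean (Nat-level) form of one level's transform on a single segment; both ports reduce to it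
def cleanStep (c : Char) (t : List Int) (nu : List Int) : List Int × List Int :=
  let n := t.length
  let h := n / 2
  let v : List Int :=
    if c == '0' then
      (List.range h).map (fun i => PySem.Int.bxor (t.getD i 0) (t.getD (i + h) 0)) ++ (t.drop h).take h
    else
      t.take h ++ (List.range h).map (fun i => PySem.Int.bxor (t.getD (i + h) 0) (t.getD i 0))
  let w : List Int :=
    if c == '0' then (nu.drop h).take h ++ nu.take h else nu.take (2 * h)
  (v ++ List.replicate (n - 2 * h) 0, w ++ List.replicate (n % 2) 0)

def splitSeg (c : Char) (tc : List Int × List Int) : List (List Int × List Int) :=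
  let p := cleanStep c tc.1 tc.2
  let h := p.1.length / 2
  [(p.1.take h, p.2.take h), (p.1.drop h, p.2.drop h)]

def levels (code : List Char) (segs : List (List Int × List Int)) : List (List Int × List Int) :=
  code.foldl (fun s c => s.flatMap (splitSeg c)) segs

def pairConcat (segs : List (List Int × List Int)) : List Int × List Int :=
  (segs.flatMap Prod.fst, segs.flatMap Prod.snd)

-- the contiguous block boundaries of segments of the given sizes, starting at offset s
def bnds : Int → List Nat → List (Int × Int)
  | _, [] => []
  | s, m :: ms => (s, (m : Int)) :: bnds (s + m) ms

def sizes (segs : List (List Int × List Int)) : List Nat := segs.map (fun p => p.1.length)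

-- the cost list of each segment is long enough for its reads; after level 0 lengths are equal
def good : List (List Int × List Int) → Prop
  | [] => True
  | [p] => 2 * (p.1.length / 2) ≤ p.2.length
  | p :: q :: rest => p.2.length = p.1.length ∧ good (q :: rest)

def allEq (segs : List (List Int × List Int)) : Prop := ∀ p ∈ segs, p.2.length = p.1.length

-- === generic lemmas about the index-writing folds (A at offset 0, B at offset s) ===

lemma fold_len (h : Nat) (a b : Nat → Int) (l : List Nat) (init : List Int) :
    (l.foldl (fun v i => (v.set i (a i)).set (i + h) (b i)) init).length = init.length := by
  induction l generalizing init with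
  | nil => rfl
  | cons x xs ih => simp [List.foldl_cons, ih]

lemma fold_get (n h : Nat) (a b : Nat → Int) (hn : 2 * h ≤ n) :
    ∀ (k : Nat), k ≤ h → ∀ (j : Nat),
    ((List.range k).foldl (fun v i => (v.set i (a i)).set (i + h) (b i))
        (List.replicate n (0 : Int)))[j]? =
      if j < k then some (a j) else if h ≤ j ∧ j < h + k then some (b (j - h))
      else (List.replicate n (0 : Int))[j]? := by
  intro k
  induction k with
  | zero => intro _ j; simp
  | succ k ih =>
    intro hk j
    rw [List.range_succ, List.foldl_append]
    simp only [List.foldl_cons, List.foldl_nil]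
    have hlen : ((List.range k).foldl (fun v i => (v.set i (a i)).set (i + h) (b i))
        (List.replicate n (0 : Int))).length = n := by rw [fold_len]; simp
    rw [List.getElem?_set, List.getElem?_set]
    simp only [List.length_set, hlen]
    by_cases e1 : k + h = j
    · rw [if_pos e1, if_pos (by omega : k + h < n), if_neg (by omega : ¬ j < k + 1),
        if_pos (by omega : h ≤ j ∧ j < h + (k + 1))]
      have ejh : j - h = k := by omega
      rw [ejh]
    · rw [if_neg e1]
      by_cases e2 : k = j
      · rw [if_pos e2, if_pos (by omega : k < n), if_pos (by omega : j < k + 1), e2]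
      · rw [if_neg e2, ih (by omega) j]
        by_cases c1 : j < k
        · rw [if_pos c1, if_pos (by omega : j < k + 1)]
        · rw [if_neg c1, if_neg (by omega : ¬ j < k + 1)]
          by_cases c2 : h ≤ j ∧ j < h + k
          · rw [if_pos c2, if_pos (by omega : h ≤ j ∧ j < h + (k + 1))]
          · rw [if_neg c2]
            by_cases c3 : h ≤ j ∧ j < h + (k + 1)
            · exfalso; omega
            · rw [if_neg c3]

lemma fold_eq (n h : Nat) (a b : Nat → Int) (hn : 2 * h ≤ n) :
    (List.range h).foldl (fun v i => (v.set i (a i)).set (i + h) (b i))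
        (List.replicate n (0 : Int))
      = (List.range h).map a ++ (List.range h).map b ++ List.replicate (n - 2 * h) (0 : Int) := by
  apply List.ext_getElem?
  intro j
  rw [fold_get n h a b hn h (le_refl h) j]
  by_cases hj : j < n
  · by_cases c1 : j < h
    · rw [if_pos c1]
      rw [List.getElem?_append_left (by simp; omega), List.getElem?_append_left (by simp; omega)]
      simp [c1]
    · rw [if_neg c1]
      by_cases c2 : j < 2 * h
      · rw [if_pos (by omega : h ≤ j ∧ j < h + h)]
        rw [List.getElem?_append_left (by simp; omega), List.getElem?_append_right (by simp; omega)]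
        simp
        exact ⟨j - h, by rw [List.getElem?_range (by omega)], rfl⟩
      · rw [if_neg (by omega : ¬ (h ≤ j ∧ j < h + h))]
        rw [List.getElem?_append_right (by simp; omega)]
        simp only [List.getElem?_replicate]
        rw [if_pos hj, if_pos (by simp; omega)]
  · rw [if_neg (by omega), if_neg (by omega)]
    rw [List.getElem?_append_right (by simp; omega)]
    simp only [List.getElem?_replicate]
    rw [if_neg hj, if_neg (by simp; omega)]

lemma fold_len_off (s h : Nat) (a b : Nat → Int) (l : List Nat) (init : List Int) :
    (l.foldl (fun v i => (v.set (s + i) (a i)).set (s + i + h) (b i)) init).length = init.length := by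
  induction l generalizing init with
  | nil => rfl
  | cons x xs ih => simp [List.foldl_cons, ih]

lemma fold_get_off (s h : Nat) (a b : Nat → Int) (init : List Int) (hsh : s + 2 * h ≤ init.length) :
    ∀ (k : Nat), k ≤ h → ∀ (j : Nat),
    ((List.range k).foldl (fun v i => (v.set (s + i) (a i)).set (s + i + h) (b i)) init)[j]? =
      if s ≤ j ∧ j < s + k then some (a (j - s))
      else if s + h ≤ j ∧ j < s + h + k then some (b (j - s - h))
      else init[j]? := by
  intro k
  induction k with
  | zero =>
    intro _ j
    simp only [List.range_zero, List.foldl_nil]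
    rw [if_neg (by omega), if_neg (by omega)]
  | succ k ih =>
    intro hk j
    rw [List.range_succ, List.foldl_append]
    simp only [List.foldl_cons, List.foldl_nil]
    have hlen : ((List.range k).foldl (fun v i => (v.set (s + i) (a i)).set (s + i + h) (b i))
        init).length = init.length := fold_len_off s h a b _ init
    rw [List.getElem?_set, List.getElem?_set]
    simp only [List.length_set, hlen]
    by_cases e1 : s + k + h = j
    · rw [if_pos e1, if_pos (by omega : s + k + h < init.length),
        if_neg (by omega : ¬ (s ≤ j ∧ j < s + (k + 1))),
        if_pos (by omega : s + h ≤ j ∧ j < s + h + (k + 1))]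
      have : j - s - h = k := by omega
      rw [this]
    · rw [if_neg e1]
      by_cases e2 : s + k = j
      · rw [if_pos e2, if_pos (by omega : s + k < init.length),
          if_pos (by omega : s ≤ j ∧ j < s + (k + 1))]
        have : j - s = k := by omega
        rw [this]
      · rw [if_neg e2, ih (by omega) j]
        by_cases c1 : s ≤ j ∧ j < s + k
        · rw [if_pos c1, if_pos (by omega : s ≤ j ∧ j < s + (k + 1))]
        · rw [if_neg c1, if_neg (by omega : ¬ (s ≤ j ∧ j < s + (k + 1)))]
          by_cases c2 : s + h ≤ j ∧ j < s + h + k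
          · rw [if_pos c2, if_pos (by omega : s + h ≤ j ∧ j < s + h + (k + 1))]
          · rw [if_neg c2]
            by_cases c3 : s + h ≤ j ∧ j < s + h + (k + 1)
            · exfalso; omega
            · rw [if_neg c3]

lemma fold_eq_off (s h : Nat) (a b : Nat → Int) (init : List Int) (hsh : s + 2 * h ≤ init.length) :
    (List.range h).foldl (fun v i => (v.set (s + i) (a i)).set (s + i + h) (b i)) init
      = init.take s ++ (List.range h).map a ++ (List.range h).map b ++ init.drop (s + 2 * h) := by
  apply List.ext_getElem?
  intro j
  rw [fold_get_off s h a b init hsh h (le_refl h) j]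
  have hts : (init.take s).length = s := by simp; omega
  by_cases c1 : j < s
  · rw [if_neg (by omega), if_neg (by omega)]
    rw [List.getElem?_append_left (by simp [hts]; omega),
        List.getElem?_append_left (by simp [hts]; omega),
        List.getElem?_append_left (by omega)]
    simp [c1]
  · by_cases c2 : j < s + h
    · rw [if_pos (by omega)]
      rw [List.getElem?_append_left (by simp [hts]; omega),
          List.getElem?_append_left (by simp [hts]; omega),
          List.getElem?_append_right (by omega)]
      rw [hts]
      simp only [List.getElem?_map]
      rw [List.getElem?_range (by omega)]
      rfl
    · by_cases c3 : j < s + 2 * h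
      · rw [if_neg (by omega), if_pos (by omega)]
        rw [List.getElem?_append_left (by simp [hts]; omega),
            List.getElem?_append_right (by simp [hts]; omega)]
        simp only [hts, List.length_append, List.length_map, List.length_range, List.getElem?_map]
        rw [List.getElem?_range (by omega)]
        have : j - (s + h) = j - s - h := by omega
        rw [this]
        rfl
      · rw [if_neg (by omega), if_neg (by omega)]
        rw [List.getElem?_append_right (by simp [hts]; omega)]
        simp only [hts, List.length_append, List.length_map, List.length_range]
        rw [List.getElem?_drop]
        congr 1
        omega

lemma mapGetD_shift (l : List Int) (h k : Nat) (hk : k + h ≤ l.length) :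
    (List.range k).map (fun i => l.getD (i + h) 0) = (l.drop h).take k := by
  apply List.ext_getElem
  · simp; omega
  · intro i hi1 hi2
    simp only [List.length_map, List.length_range] at hi1
    simp only [List.getElem_map, List.getElem_range, List.getElem_take, List.getElem_drop]
    rw [List.getD_eq_getElem?_getD, List.getElem?_eq_getElem (by omega)]
    simp [Nat.add_comm]

lemma mapGetD_take (l : List Int) (k : Nat) (hk : k ≤ l.length) :
    (List.range k).map (fun i => l.getD i 0) = l.take k := by
  have := mapGetD_shift l 0 k (by omega)
  simpa using this

-- === A's step is cleanStep ===

lemma stepA_eq_cleanStep (c : Char) (t nu : List Int) (h2 : 2 * (t.length / 2) ≤ nu.length) :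
    stepA c t nu = cleanStep c t nu := by
  unfold stepA cleanStep
  simp only [PySem.List.len_eq, halfI, PySem.List.pyRange_one, Int.sub_zero, Int.toNat_natCast,
    List.foldl_map, zero_add, ← Nat.cast_add, PySem.List.pySetD_natCast, PySem.List.pyGetD_natCast]
  have hn : 2 * (t.length / 2) ≤ t.length := by omega
  by_cases hc : (c == '0') = true
  · simp only [hc, if_true]
    simp only [PySem.List.foldl_prod_mk
        (f := fun (v : List Int) (k : Nat) =>
          (v.set k (PySem.Int.bxor (t.getD k 0) (t.getD (k + t.length / 2) 0))).set
            (k + t.length / 2) (t.getD (k + t.length / 2) 0))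
        (g := fun (v : List Int) (k : Nat) =>
          (v.set k (nu.getD (k + t.length / 2) 0)).set (k + t.length / 2) (nu.getD k 0))]
    rw [fold_eq _ _ _ _ hn, fold_eq _ _ _ _ hn]
    rw [mapGetD_shift t (t.length / 2) (t.length / 2) (by omega),
        mapGetD_shift nu (t.length / 2) (t.length / 2) (by omega),
        mapGetD_take nu (t.length / 2) (by omega)]
    rw [List.append_assoc]
    have : t.length - 2 * (t.length / 2) = t.length % 2 := by omega
    rw [this]
  · rw [Bool.not_eq_true] at hc
    simp only [hc, Bool.false_eq_true, if_false]
    simp only [PySem.List.foldl_prod_mk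
        (f := fun (v : List Int) (k : Nat) =>
          (v.set k (t.getD k 0)).set
            (k + t.length / 2) (PySem.Int.bxor (t.getD (k + t.length / 2) 0) (t.getD k 0)))
        (g := fun (v : List Int) (k : Nat) =>
          (v.set k (nu.getD k 0)).set (k + t.length / 2) (nu.getD (k + t.length / 2) 0))]
    rw [fold_eq _ _ _ _ hn, fold_eq _ _ _ _ hn]
    rw [mapGetD_shift nu (t.length / 2) (t.length / 2) (by omega),
        mapGetD_take t (t.length / 2) (by omega),
        mapGetD_take nu (t.length / 2) (by omega)]
    have e1 : t.length - 2 * (t.length / 2) = t.length % 2 := by omega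
    have e2 : 2 * (t.length / 2) = t.length / 2 + t.length / 2 := by omega
    rw [List.append_assoc, e1, e2, List.take_add]

lemma length_cleanStep_fst (c : Char) (t nu : List Int) :
    (cleanStep c t nu).1.length = t.length := by
  unfold cleanStep
  split <;> simp <;> omega

lemma length_cleanStep_snd (c : Char) (t nu : List Int) (h2 : 2 * (t.length / 2) ≤ nu.length) :
    (cleanStep c t nu).2.length = t.length := by
  unfold cleanStep
  split <;> simp <;> omega

lemma levels_append (code : List Char) (s1 s2 : List (List Int × List Int)) :
    levels code (s1 ++ s2) = levels code s1 ++ levels code s2 := by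
  induction code generalizing s1 s2 with
  | nil => rfl
  | cons c rest ih => simp only [levels, List.foldl_cons, List.flatMap_append] at *; exact ih _ _

lemma pairConcat_append (s1 s2 : List (List Int × List Int)) :
    pairConcat (s1 ++ s2) = ((pairConcat s1).1 ++ (pairConcat s2).1,
      (pairConcat s1).2 ++ (pairConcat s2).2) := by
  simp [pairConcat]

lemma getSpecAux_cons2 (c c2 : Char) (r : List Char) (t nu : List Int) :
    getSpecAux (c :: c2 :: r) t nu =
      ((getSpecAux (c2 :: r)
          (PySem.List.slice (stepA c t nu).1 none (some (PySem.Int.floordiv (PySem.List.len t) 2)))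
          (PySem.List.slice (stepA c t nu).2 none (some (PySem.Int.floordiv (PySem.List.len t) 2)))).1 ++
       (getSpecAux (c2 :: r)
          (PySem.List.slice (stepA c t nu).1 (some (PySem.Int.floordiv (PySem.List.len t) 2)) none)
          (PySem.List.slice (stepA c t nu).2 (some (PySem.Int.floordiv (PySem.List.len t) 2)) none)).1,
       (getSpecAux (c2 :: r)
          (PySem.List.slice (stepA c t nu).1 none (some (PySem.Int.floordiv (PySem.List.len t) 2)))
          (PySem.List.slice (stepA c t nu).2 none (some (PySem.Int.floordiv (PySem.List.len t) 2)))).2 ++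
       (getSpecAux (c2 :: r)
          (PySem.List.slice (stepA c t nu).1 (some (PySem.Int.floordiv (PySem.List.len t) 2)) none)
          (PySem.List.slice (stepA c t nu).2 (some (PySem.Int.floordiv (PySem.List.len t) 2)) none)).2) := rfl

lemma aux_eq_levels (code : List Char) (t nu : List Int) (hc : code ≠ [])
    (h2 : 2 * (t.length / 2) ≤ nu.length) :
    getSpecAux code t nu = pairConcat (levels code [(t, nu)]) := by
  induction code generalizing t nu with
  | nil => exact absurd rfl hc
  | cons c rest ih =>
    have hstep : stepA c t nu = cleanStep c t nu := stepA_eq_cleanStep c t nu h2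
    have hlen1 : (cleanStep c t nu).1.length = t.length := length_cleanStep_fst c t nu
    have hlen2 : (cleanStep c t nu).2.length = t.length := length_cleanStep_snd c t nu h2
    have hlevels : levels (c :: rest) [(t, nu)] = levels rest (splitSeg c (t, nu)) := by
      simp [levels, List.foldl_cons]
    cases rest with
    | nil =>
      simp only [getSpecAux, hstep]
      rw [hlevels]
      simp only [levels, List.foldl_nil, splitSeg, pairConcat]
      simp [hlen1]
    | cons c2 rest2 =>
      rw [getSpecAux_cons2]
      simp only [PySem.List.len_eq, halfI, PySem.List.slice_to_natCast,
        PySem.List.slice_from_natCast, hstep]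
      rw [hlevels]
      have hsplit : splitSeg c (t, nu) =
          [((cleanStep c t nu).1.take (t.length / 2), (cleanStep c t nu).2.take (t.length / 2)),
           ((cleanStep c t nu).1.drop (t.length / 2), (cleanStep c t nu).2.drop (t.length / 2))] := by
        simp [splitSeg, hlen1]
      rw [hsplit, show
          [((cleanStep c t nu).1.take (t.length / 2), (cleanStep c t nu).2.take (t.length / 2)),
           ((cleanStep c t nu).1.drop (t.length / 2), (cleanStep c t nu).2.drop (t.length / 2))]
          = [((cleanStep c t nu).1.take (t.length / 2), (cleanStep c t nu).2.take (t.length / 2))] ++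
            [((cleanStep c t nu).1.drop (t.length / 2), (cleanStep c t nu).2.drop (t.length / 2))]
          from rfl, levels_append, pairConcat_append]
      rw [ih ((cleanStep c t nu).1.take (t.length / 2)) ((cleanStep c t nu).2.take (t.length / 2))
            (by simp) (by simp [hlen1, hlen2]; omega),
          ih ((cleanStep c t nu).1.drop (t.length / 2)) ((cleanStep c t nu).2.drop (t.length / 2))
            (by simp) (by simp [hlen1, hlen2]; omega)]

-- === goodness bookkeeping ===

lemma good_head (p : List Int × List Int) (rest : List (List Int × List Int))
    (hg : good (p :: rest)) : 2 * (p.1.length / 2) ≤ p.2.length := by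
  cases rest with
  | nil => exact hg
  | cons q r => rw [hg.1]; omega

lemma good_tail (p : List Int × List Int) (rest : List (List Int × List Int))
    (hg : good (p :: rest)) : good rest := by
  cases rest with
  | nil => trivial
  | cons q r => exact hg.2

lemma good_mem (segs : List (List Int × List Int)) (hg : good segs) :
    ∀ p ∈ segs, 2 * (p.1.length / 2) ≤ p.2.length := by
  induction segs with
  | nil => intro p hp; cases hp
  | cons q rest ih =>
    intro p hp
    cases hp with
    | head => exact good_head q rest hg
    | tail _ hmem => exact ih (good_tail q rest hg) p hmem

lemma allEq_good (segs : List (List Int × List Int)) (h : allEq segs) : good segs := by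
  induction segs with
  | nil => trivial
  | cons p rest ih =>
    cases rest with
    | nil =>
      show 2 * (p.1.length / 2) ≤ p.2.length
      rw [h p (by simp)]; omega
    | cons q r =>
      exact ⟨h p (by simp), ih (fun x hx => h x (by simp [hx]))⟩

lemma split_allEq (bit : Char) (segs : List (List Int × List Int)) (hg : good segs) :
    allEq (segs.flatMap (splitSeg bit)) := by
  intro p hp
  rw [List.mem_flatMap] at hp
  obtain ⟨q, hq, hpq⟩ := hp
  have hlen1 := length_cleanStep_fst bit q.1 q.2
  have hlen2 := length_cleanStep_snd bit q.1 q.2 (good_mem segs hg q hq)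
  simp only [splitSeg, List.mem_cons] at hpq
  rcases hpq with h | h | h
  · subst h; simp [hlen1, hlen2]
  · subst h; simp [hlen1, hlen2]
  · cases h

lemma flatMap_split_fst (bit : Char) (segs : List (List Int × List Int)) :
    (segs.flatMap (splitSeg bit)).flatMap Prod.fst
      = segs.flatMap (fun p => (cleanStep bit p.1 p.2).1) := by
  rw [List.flatMap_assoc]
  apply List.flatMap_congr
  intro q _
  simp [splitSeg, List.take_append_drop]

lemma flatMap_split_snd (bit : Char) (segs : List (List Int × List Int)) :
    (segs.flatMap (splitSeg bit)).flatMap Prod.snd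
      = segs.flatMap (fun p => (cleanStep bit p.1 p.2).2) := by
  rw [List.flatMap_assoc]
  apply List.flatMap_congr
  intro q _
  simp [splitSeg, List.take_append_drop]

lemma sizes_split (bit : Char) (segs : List (List Int × List Int)) :
    sizes (segs.flatMap (splitSeg bit))
      = segs.flatMap (fun p => [p.1.length / 2, p.1.length - p.1.length / 2]) := by
  unfold sizes
  rw [List.map_flatMap]
  apply List.flatMap_congr
  intro q _
  have hlen1 := length_cleanStep_fst bit q.1 q.2
  simp [splitSeg, hlen1, Nat.min_eq_left (Nat.div_le_self _ _)]

lemma length_flatMap_clean (bit : Char) (segs : List (List Int × List Int)) :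
    (segs.flatMap (fun p => (cleanStep bit p.1 p.2).1)).length
      = (segs.flatMap Prod.fst).length := by
  simp only [List.length_flatMap]
  congr 1
  apply List.map_congr_left
  intro q _
  exact length_cleanStep_fst bit q.1 q.2

-- === evaluating B's block on its region ===

lemma getD_append_middle (pre t suf : List Int) (i : Nat) (hi : i < t.length) :
    (pre ++ t ++ suf).getD (pre.length + i) 0 = t.getD i 0 := by
  rw [List.getD_eq_getElem?_getD, List.getD_eq_getElem?_getD, List.append_assoc,
    List.getElem?_append_right (by omega), Nat.add_sub_cancel_left,
    List.getElem?_append_left hi]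

lemma blockB_eval (bit : Char) (vpre t restV cpre nu restC doneV doneC : List Int)
    (doneB : List (Int × Int)) (z : Nat)
    (hsv : doneV.length = vpre.length) (hsc : doneC.length = vpre.length)
    (hcl : cpre.length = vpre.length)
    (hnu : 2 * (t.length / 2) ≤ nu.length) (hz : t.length ≤ z) :
    blockB bit (vpre ++ t ++ restV) (cpre ++ nu ++ restC)
      (doneV ++ List.replicate z (0 : Int), doneC ++ List.replicate z (0 : Int), doneB)
      ((vpre.length : Int), (t.length : Int))
    = ((doneV ++ (cleanStep bit t nu).1) ++ List.replicate (z - t.length) (0 : Int),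
       (doneC ++ (cleanStep bit t nu).2) ++ List.replicate (z - t.length) (0 : Int),
       doneB ++ [((vpre.length : Int), ((t.length / 2 : Nat) : Int)),
                 (((vpre.length + t.length / 2 : Nat) : Int), ((t.length - t.length / 2 : Nat) : Int))]) := by
  have hm2 : 2 * (t.length / 2) ≤ t.length := by omega
  unfold blockB
  simp only [halfI, PySem.List.pyRange_one, Int.sub_zero, Int.toNat_natCast, List.foldl_map,
    zero_add]
  have cast1 : ∀ k : Nat, (vpre.length : Int) + (k : Int) = ((vpre.length + k : Nat) : Int) := by
    intro k; push_cast; ring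
  have cast2 : ∀ k : Nat, ((vpre.length + k : Nat) : Int) + ((t.length / 2 : Nat) : Int)
      = ((vpre.length + (k + t.length / 2) : Nat) : Int) := by
    intro k; push_cast; ring
  simp only [cast1, cast2, PySem.List.pySetD_natCast, PySem.List.pyGetD_natCast]
  have hreadV : ∀ (i : Nat), i < t.length →
      (vpre ++ t ++ restV).getD (vpre.length + i) 0 = t.getD i 0 :=
    fun i hi => getD_append_middle vpre t restV i hi
  have hreadC : ∀ (i : Nat), i < nu.length →
      (cpre ++ nu ++ restC).getD (vpre.length + i) 0 = nu.getD i 0 := by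
    intro i hi
    rw [← hcl]
    exact getD_append_middle cpre nu restC i hi
  have hinit : (doneV ++ List.replicate z (0 : Int)).length = vpre.length + z := by
    simp [hsv]
  have hinitC : (doneC ++ List.replicate z (0 : Int)).length = vpre.length + z := by
    simp [hsc]
  have htakeV : (doneV ++ List.replicate z (0 : Int)).take vpre.length = doneV := by
    rw [← hsv, List.take_left]
  have htakeC : (doneC ++ List.replicate z (0 : Int)).take vpre.length = doneC := by
    rw [← hsc, List.take_left]
  have hdropV : (doneV ++ List.replicate z (0 : Int)).drop (vpre.length + 2 * (t.length / 2))
      = List.replicate (z - 2 * (t.length / 2)) (0 : Int) := by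
    rw [← hsv, List.drop_append, List.drop_replicate,
      List.drop_eq_nil_of_le (by omega), List.nil_append]
    congr 1
    omega
  have hdropC : (doneC ++ List.replicate z (0 : Int)).drop (vpre.length + 2 * (t.length / 2))
      = List.replicate (z - 2 * (t.length / 2)) (0 : Int) := by
    rw [← hsc, List.drop_append, List.drop_replicate,
      List.drop_eq_nil_of_le (by omega), List.nil_append]
    congr 1
    omega
  have hreplsplit : List.replicate (z - 2 * (t.length / 2)) (0 : Int)
      = List.replicate (t.length - 2 * (t.length / 2)) (0 : Int)
        ++ List.replicate (z - t.length) (0 : Int) := by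
    rw [← List.replicate_add]
    congr 1
    omega
  have hmod : t.length - 2 * (t.length / 2) = t.length % 2 := by omega
  by_cases hc : (bit == '0') = true
  · simp only [hc, if_true]
    rw [PySem.List.foldl_prod_mk
        (f := fun (v : List Int) (k : Nat) =>
          (v.set (vpre.length + k)
              (PySem.Int.bxor ((vpre ++ t ++ restV).getD (vpre.length + k) 0)
                ((vpre ++ t ++ restV).getD (vpre.length + (k + t.length / 2)) 0))).set
            (vpre.length + (k + t.length / 2))
            ((vpre ++ t ++ restV).getD (vpre.length + (k + t.length / 2)) 0))
        (g := fun (v : List Int) (k : Nat) =>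
          (v.set (vpre.length + k) ((cpre ++ nu ++ restC).getD (vpre.length + (k + t.length / 2)) 0)).set
            (vpre.length + (k + t.length / 2)) ((cpre ++ nu ++ restC).getD (vpre.length + k) 0))]
    have ev : (List.range (t.length / 2)).foldl
        (fun (v : List Int) (k : Nat) =>
          (v.set (vpre.length + k)
              (PySem.Int.bxor ((vpre ++ t ++ restV).getD (vpre.length + k) 0)
                ((vpre ++ t ++ restV).getD (vpre.length + (k + t.length / 2)) 0))).set
            (vpre.length + (k + t.length / 2))
            ((vpre ++ t ++ restV).getD (vpre.length + (k + t.length / 2)) 0))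
        (doneV ++ List.replicate z (0 : Int))
        = (doneV ++ (cleanStep bit t nu).1) ++ List.replicate (z - t.length) (0 : Int) := by
      have hshape : (fun (v : List Int) (k : Nat) =>
          (v.set (vpre.length + k)
              (PySem.Int.bxor ((vpre ++ t ++ restV).getD (vpre.length + k) 0)
                ((vpre ++ t ++ restV).getD (vpre.length + (k + t.length / 2)) 0))).set
            (vpre.length + (k + t.length / 2))
            ((vpre ++ t ++ restV).getD (vpre.length + (k + t.length / 2)) 0))
          = (fun (v : List Int) (k : Nat) =>
          (v.set (vpre.length + k)
              (PySem.Int.bxor ((vpre ++ t ++ restV).getD (vpre.length + k) 0)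
                ((vpre ++ t ++ restV).getD (vpre.length + (k + t.length / 2)) 0))).set
            (vpre.length + k + t.length / 2)
            ((vpre ++ t ++ restV).getD (vpre.length + (k + t.length / 2)) 0)) := by
        funext v k; rw [Nat.add_assoc]
      rw [hshape, fold_eq_off vpre.length (t.length / 2) _ _ _ (by rw [hinit]; omega),
        htakeV, hdropV]
      have e1 : (List.range (t.length / 2)).map (fun k =>
          PySem.Int.bxor ((vpre ++ t ++ restV).getD (vpre.length + k) 0)
            ((vpre ++ t ++ restV).getD (vpre.length + (k + t.length / 2)) 0))
          = (List.range (t.length / 2)).map (fun k =>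
            PySem.Int.bxor (t.getD k 0) (t.getD (k + t.length / 2) 0)) := by
        apply List.map_congr_left
        intro k hk
        rw [List.mem_range] at hk
        rw [hreadV k (by omega), hreadV (k + t.length / 2) (by omega)]
      have e2 : (List.range (t.length / 2)).map (fun k =>
          (vpre ++ t ++ restV).getD (vpre.length + (k + t.length / 2)) 0)
          = (List.range (t.length / 2)).map (fun k => t.getD (k + t.length / 2) 0) := by
        apply List.map_congr_left
        intro k hk
        rw [List.mem_range] at hk
        rw [hreadV (k + t.length / 2) (by omega)]
      rw [e1, e2, mapGetD_shift t (t.length / 2) (t.length / 2) (by omega), hreplsplit]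
      unfold cleanStep
      simp only [hc, if_true, hmod]
      simp [List.append_assoc]
    have ec : (List.range (t.length / 2)).foldl
        (fun (v : List Int) (k : Nat) =>
          (v.set (vpre.length + k) ((cpre ++ nu ++ restC).getD (vpre.length + (k + t.length / 2)) 0)).set
            (vpre.length + (k + t.length / 2)) ((cpre ++ nu ++ restC).getD (vpre.length + k) 0))
        (doneC ++ List.replicate z (0 : Int))
        = (doneC ++ (cleanStep bit t nu).2) ++ List.replicate (z - t.length) (0 : Int) := by
      have hshape : (fun (v : List Int) (k : Nat) =>
          (v.set (vpre.length + k) ((cpre ++ nu ++ restC).getD (vpre.length + (k + t.length / 2)) 0)).set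
            (vpre.length + (k + t.length / 2)) ((cpre ++ nu ++ restC).getD (vpre.length + k) 0))
          = (fun (v : List Int) (k : Nat) =>
          (v.set (vpre.length + k) ((cpre ++ nu ++ restC).getD (vpre.length + (k + t.length / 2)) 0)).set
            (vpre.length + k + t.length / 2) ((cpre ++ nu ++ restC).getD (vpre.length + k) 0)) := by
        funext v k; rw [Nat.add_assoc]
      rw [hshape, fold_eq_off vpre.length (t.length / 2) _ _ _ (by rw [hinitC]; omega),
        htakeC, hdropC]
      have e1 : (List.range (t.length / 2)).map (fun k =>
          (cpre ++ nu ++ restC).getD (vpre.length + (k + t.length / 2)) 0)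
          = (List.range (t.length / 2)).map (fun k => nu.getD (k + t.length / 2) 0) := by
        apply List.map_congr_left
        intro k hk
        rw [List.mem_range] at hk
        rw [hreadC (k + t.length / 2) (by omega)]
      have e2 : (List.range (t.length / 2)).map (fun k =>
          (cpre ++ nu ++ restC).getD (vpre.length + k) 0)
          = (List.range (t.length / 2)).map (fun k => nu.getD k 0) := by
        apply List.map_congr_left
        intro k hk
        rw [List.mem_range] at hk
        rw [hreadC k (by omega)]
      rw [e1, e2, mapGetD_shift nu (t.length / 2) (t.length / 2) (by omega),
        mapGetD_take nu (t.length / 2) (by omega), hreplsplit]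
      unfold cleanStep
      simp only [hc, if_true, hmod]
      simp [List.append_assoc]
    rw [ev, ec]
    have hcast4 : (t.length : Int) - ((t.length / 2 : Nat) : Int)
        = ((t.length - t.length / 2 : Nat) : Int) := by
      have : t.length / 2 ≤ t.length := Nat.div_le_self _ _
      push_cast [this]; ring
    simp only [hcast4]
  · rw [Bool.not_eq_true] at hc
    simp only [hc, Bool.false_eq_true, if_false]
    rw [PySem.List.foldl_prod_mk
        (f := fun (v : List Int) (k : Nat) =>
          (v.set (vpre.length + k) ((vpre ++ t ++ restV).getD (vpre.length + k) 0)).set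
            (vpre.length + (k + t.length / 2))
            (PySem.Int.bxor ((vpre ++ t ++ restV).getD (vpre.length + (k + t.length / 2)) 0)
              ((vpre ++ t ++ restV).getD (vpre.length + k) 0)))
        (g := fun (v : List Int) (k : Nat) =>
          (v.set (vpre.length + k) ((cpre ++ nu ++ restC).getD (vpre.length + k) 0)).set
            (vpre.length + (k + t.length / 2)) ((cpre ++ nu ++ restC).getD (vpre.length + (k + t.length / 2)) 0))]
    have ev : (List.range (t.length / 2)).foldl
        (fun (v : List Int) (k : Nat) =>
          (v.set (vpre.length + k) ((vpre ++ t ++ restV).getD (vpre.length + k) 0)).set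
            (vpre.length + (k + t.length / 2))
            (PySem.Int.bxor ((vpre ++ t ++ restV).getD (vpre.length + (k + t.length / 2)) 0)
              ((vpre ++ t ++ restV).getD (vpre.length + k) 0)))
        (doneV ++ List.replicate z (0 : Int))
        = (doneV ++ (cleanStep bit t nu).1) ++ List.replicate (z - t.length) (0 : Int) := by
      have hshape : (fun (v : List Int) (k : Nat) =>
          (v.set (vpre.length + k) ((vpre ++ t ++ restV).getD (vpre.length + k) 0)).set
            (vpre.length + (k + t.length / 2))
            (PySem.Int.bxor ((vpre ++ t ++ restV).getD (vpre.length + (k + t.length / 2)) 0)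
              ((vpre ++ t ++ restV).getD (vpre.length + k) 0)))
          = (fun (v : List Int) (k : Nat) =>
          (v.set (vpre.length + k) ((vpre ++ t ++ restV).getD (vpre.length + k) 0)).set
            (vpre.length + k + t.length / 2)
            (PySem.Int.bxor ((vpre ++ t ++ restV).getD (vpre.length + (k + t.length / 2)) 0)
              ((vpre ++ t ++ restV).getD (vpre.length + k) 0))) := by
        funext v k; rw [Nat.add_assoc]
      rw [hshape, fold_eq_off vpre.length (t.length / 2) _ _ _ (by rw [hinit]; omega),
        htakeV, hdropV]
      have e1 : (List.range (t.length / 2)).map (fun k =>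
          (vpre ++ t ++ restV).getD (vpre.length + k) 0)
          = (List.range (t.length / 2)).map (fun k => t.getD k 0) := by
        apply List.map_congr_left
        intro k hk
        rw [List.mem_range] at hk
        rw [hreadV k (by omega)]
      have e2 : (List.range (t.length / 2)).map (fun k =>
          PySem.Int.bxor ((vpre ++ t ++ restV).getD (vpre.length + (k + t.length / 2)) 0)
            ((vpre ++ t ++ restV).getD (vpre.length + k) 0))
          = (List.range (t.length / 2)).map (fun k =>
            PySem.Int.bxor (t.getD (k + t.length / 2) 0) (t.getD k 0)) := by
        apply List.map_congr_left
        intro k hk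
        rw [List.mem_range] at hk
        rw [hreadV k (by omega), hreadV (k + t.length / 2) (by omega)]
      rw [e1, e2, mapGetD_take t (t.length / 2) (by omega), hreplsplit]
      unfold cleanStep
      simp only [hc, Bool.false_eq_true, if_false, hmod]
      simp [List.append_assoc]
    have ec : (List.range (t.length / 2)).foldl
        (fun (v : List Int) (k : Nat) =>
          (v.set (vpre.length + k) ((cpre ++ nu ++ restC).getD (vpre.length + k) 0)).set
            (vpre.length + (k + t.length / 2)) ((cpre ++ nu ++ restC).getD (vpre.length + (k + t.length / 2)) 0))
        (doneC ++ List.replicate z (0 : Int))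
        = (doneC ++ (cleanStep bit t nu).2) ++ List.replicate (z - t.length) (0 : Int) := by
      have hshape : (fun (v : List Int) (k : Nat) =>
          (v.set (vpre.length + k) ((cpre ++ nu ++ restC).getD (vpre.length + k) 0)).set
            (vpre.length + (k + t.length / 2)) ((cpre ++ nu ++ restC).getD (vpre.length + (k + t.length / 2)) 0))
          = (fun (v : List Int) (k : Nat) =>
          (v.set (vpre.length + k) ((cpre ++ nu ++ restC).getD (vpre.length + k) 0)).set
            (vpre.length + k + t.length / 2) ((cpre ++ nu ++ restC).getD (vpre.length + (k + t.length / 2)) 0)) := by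
        funext v k; rw [Nat.add_assoc]
      rw [hshape, fold_eq_off vpre.length (t.length / 2) _ _ _ (by rw [hinitC]; omega),
        htakeC, hdropC]
      have e1 : (List.range (t.length / 2)).map (fun k =>
          (cpre ++ nu ++ restC).getD (vpre.length + k) 0)
          = (List.range (t.length / 2)).map (fun k => nu.getD k 0) := by
        apply List.map_congr_left
        intro k hk
        rw [List.mem_range] at hk
        rw [hreadC k (by omega)]
      have e2 : (List.range (t.length / 2)).map (fun k =>
          (cpre ++ nu ++ restC).getD (vpre.length + (k + t.length / 2)) 0)
          = (List.range (t.length / 2)).map (fun k => nu.getD (k + t.length / 2) 0) := by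
        apply List.map_congr_left
        intro k hk
        rw [List.mem_range] at hk
        rw [hreadC (k + t.length / 2) (by omega)]
      rw [e1, e2, mapGetD_take nu (t.length / 2) (by omega),
        mapGetD_shift nu (t.length / 2) (t.length / 2) (by omega), hreplsplit]
      unfold cleanStep
      simp only [hc, Bool.false_eq_true, if_false, hmod]
      have h2h : 2 * (t.length / 2) = t.length / 2 + t.length / 2 := by omega
      rw [h2h, List.take_add]
      simp [List.append_assoc]
    rw [ev, ec]
    have hcast4 : (t.length : Int) - ((t.length / 2 : Nat) : Int)
        = ((t.length - t.length / 2 : Nat) : Int) := by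
      have : t.length / 2 ≤ t.length := Nat.div_le_self _ _
      push_cast [this]; ring
    simp only [hcast4]

-- === folding B's block writer over all blocks of one level ===

lemma blocks_fold (bit : Char) :
    ∀ (segs : List (List Int × List Int)) (vpre cpre doneV doneC : List Int)
      (doneB : List (Int × Int)),
    good segs →
    (segs ≠ [] → cpre.length = vpre.length) →
    doneV.length = vpre.length → doneC.length = vpre.length →
    (bnds (vpre.length : Int) (sizes segs)).foldl
        (blockB bit (vpre ++ segs.flatMap Prod.fst) (cpre ++ segs.flatMap Prod.snd))
        (doneV ++ List.replicate (segs.flatMap Prod.fst).length (0 : Int),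
         doneC ++ List.replicate (segs.flatMap Prod.fst).length (0 : Int), doneB)
    = (doneV ++ segs.flatMap (fun p => (cleanStep bit p.1 p.2).1),
       doneC ++ segs.flatMap (fun p => (cleanStep bit p.1 p.2).2),
       doneB ++ bnds (vpre.length : Int)
         (segs.flatMap (fun p => [p.1.length / 2, p.1.length - p.1.length / 2]))) := by
  intro segs
  induction segs with
  | nil =>
    intro vpre cpre doneV doneC doneB _ _ _ _
    simp [sizes, bnds]
  | cons p rest ih =>
    intro vpre cpre doneV doneC doneB hg hcl hdv hdc
    obtain ⟨t, nu⟩ := p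
    have hnu : 2 * (t.length / 2) ≤ nu.length := good_head (t, nu) rest hg
    have hcl' : cpre.length = vpre.length := hcl (by simp)
    have hflat : ((t, nu) :: rest).flatMap Prod.fst = t ++ rest.flatMap Prod.fst := by simp
    have hflatc : ((t, nu) :: rest).flatMap Prod.snd = nu ++ rest.flatMap Prod.snd := by simp
    have hsizes : sizes ((t, nu) :: rest) = t.length :: sizes rest := by simp [sizes]
    rw [hsizes]
    show (((vpre.length : Int), (t.length : Int)) :: bnds ((vpre.length : Int) + (t.length : Nat)) (sizes rest)).foldl _ _ = _
    rw [List.foldl_cons]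
    have hz : t.length ≤ (((t, nu) :: rest).flatMap Prod.fst).length := by
      rw [hflat]; simp
    have hassocV : vpre ++ ((t, nu) :: rest).flatMap Prod.fst
        = (vpre ++ t) ++ rest.flatMap Prod.fst := by rw [hflat, List.append_assoc]
    have hassocC : cpre ++ ((t, nu) :: rest).flatMap Prod.snd
        = (cpre ++ nu) ++ rest.flatMap Prod.snd := by rw [hflatc, List.append_assoc]
    have heval := blockB_eval bit vpre t (rest.flatMap Prod.fst) cpre nu (rest.flatMap Prod.snd)
      doneV doneC doneB (((t, nu) :: rest).flatMap Prod.fst).length hdv hdc hcl' hnu hz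
    rw [hassocV, hassocC, heval]
    have hzrest : (((t, nu) :: rest).flatMap Prod.fst).length - t.length
        = (rest.flatMap Prod.fst).length := by rw [hflat]; simp
    rw [hzrest]
    have hcast : (vpre.length : Int) + (t.length : Nat) = (((vpre ++ t).length : Nat) : Int) := by
      simp
    rw [hcast]
    have ihr := ih (vpre ++ t) (cpre ++ nu) (doneV ++ (cleanStep bit t nu).1)
      (doneC ++ (cleanStep bit t nu).2)
      (doneB ++ [((vpre.length : Int), ((t.length / 2 : Nat) : Int)),
        (((vpre.length + t.length / 2 : Nat) : Int), ((t.length - t.length / 2 : Nat) : Int))])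
      (good_tail _ _ hg)
      (fun hne => by
        have : nu.length = t.length := by
          cases rest with
          | nil => exact absurd rfl hne
          | cons q r => exact hg.1
        simp [this, hcl'])
      (by simp [length_cleanStep_fst, hdv])
      (by simp [length_cleanStep_snd bit t nu hnu, hdc])
    rw [ihr]
    have hsz : ((t, nu) :: rest).flatMap (fun p => [p.1.length / 2, p.1.length - p.1.length / 2])
        = [t.length / 2, t.length - t.length / 2]
          ++ rest.flatMap (fun p => [p.1.length / 2, p.1.length - p.1.length / 2]) := by simp
    have hb : bnds (vpre.length : Int)
        ([t.length / 2, t.length - t.length / 2]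
          ++ rest.flatMap (fun p => [p.1.length / 2, p.1.length - p.1.length / 2]))
        = ((vpre.length : Int), ((t.length / 2 : Nat) : Int))
          :: (((vpre.length + t.length / 2 : Nat) : Int), ((t.length - t.length / 2 : Nat) : Int))
          :: bnds (((vpre ++ t).length : Nat) : Int)
               (rest.flatMap (fun p => [p.1.length / 2, p.1.length - p.1.length / 2])) := by
      show ((vpre.length : Int), ((t.length / 2 : Nat) : Int))
          :: (((vpre.length : Int) + (t.length / 2 : Nat) : Int), ((t.length - t.length / 2 : Nat) : Int))
          :: bnds ((vpre.length : Int) + (t.length / 2 : Nat) + ((t.length - t.length / 2 : Nat))) _ = _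
      have c1 : (vpre.length : Int) + ((t.length / 2 : Nat) : Int)
          = ((vpre.length + t.length / 2 : Nat) : Int) := by push_cast; ring
      have c2 : ((vpre.length + t.length / 2 : Nat) : Int)
            + ((t.length - t.length / 2 : Nat) : Int)
          = (((vpre ++ t).length : Nat) : Int) := by
        have ht : t.length / 2 ≤ t.length := Nat.div_le_self _ _
        push_cast [ht]
        simp only [List.length_append]
        push_cast
        ring
      rw [c1, c2]
      simp
    rw [hsz, hb]
    simp [List.append_assoc]

-- === one whole level, and then all levels ===

lemma levels_fold (cl : List Char) :
    ∀ (segs : List (List Int × List Int)) (n : Nat), good segs →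
    n = (segs.flatMap Prod.fst).length →
    cl.foldl (fun st bit =>
        st.2.2.foldl (blockB bit st.1 st.2.1)
          (List.replicate n (0 : Int), List.replicate n (0 : Int), ([] : List (Int × Int))))
      (segs.flatMap Prod.fst, segs.flatMap Prod.snd, bnds 0 (sizes segs))
    = ((levels cl segs).flatMap Prod.fst, (levels cl segs).flatMap Prod.snd,
       bnds 0 (sizes (levels cl segs))) := by
  induction cl with
  | nil => intro segs n _ _; simp [levels]
  | cons bit cl' ih =>
    intro segs n hg hn
    rw [List.foldl_cons]
    have h0 : ((([] : List Int).length : Nat) : Int) = (0 : Int) := by simp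
    have hstep := blocks_fold bit segs [] [] [] [] [] hg (fun _ => rfl) rfl rfl
    simp only [List.nil_append, h0] at hstep
    rw [← hn] at hstep
    rw [hstep]
    have hsegs' : levels (bit :: cl') segs = levels cl' (segs.flatMap (splitSeg bit)) := by
      simp [levels, List.foldl_cons]
    rw [hsegs']
    have e1 := flatMap_split_fst bit segs
    have e2 := flatMap_split_snd bit segs
    have e3 := sizes_split bit segs
    rw [← e1, ← e2, ← e3]
    exact ih (segs.flatMap (splitSeg bit)) n
      (allEq_good _ (split_allEq bit segs hg))
      (by rw [e1, length_flatMap_clean]; exact hn)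

lemma alt_eq_levels (code : String) (t nu : List Int)
    (h2 : 2 * (t.length / 2) ≤ nu.length) :
    getSpec_alt code t nu = pairConcat (levels code.toList [(t, nu)]) := by
  unfold getSpec_alt
  have hg : good [(t, nu)] := h2
  have hfold := levels_fold code.toList [(t, nu)] t.length hg (by simp)
  have hinit1 : ([(t, nu)] : List (List Int × List Int)).flatMap Prod.fst = t := by simp
  have hinit2 : ([(t, nu)] : List (List Int × List Int)).flatMap Prod.snd = nu := by simp
  have hinit3 : bnds 0 (sizes [(t, nu)]) = [((0 : Int), (t.length : Int))] := by
    simp [bnds, sizes]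
  rw [hinit1, hinit2, hinit3] at hfold
  simp only [hfold, pairConcat]

-- ===== VERDICT (by name: the statement is the Claim_ definition above) =====
theorem getSpec_spec : Claim_equal_getSpec := by
  intro code table nums _ hpre
  unfold Spec_getSpec getSpec
  rw [alt_eq_levels _ _ _ hpre.2, aux_eq_levels code.toList table nums
    (by intro h; exact hpre.1 (String.toList_eq_nil_iff.mp h)) hpre.2]
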